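-- pv_equiv track=rewrite | github.com/scoding123/Hidden_Markov_Model | tagger.py | get_ksi
-- ===== SOURCE A (Python) =====
-- def get_ksi(tags_list,ksi):
--
--     i = 0
--     counter_var = len(tags_list)-1
--     while i < (counter_var):
--         counter1 = tags_list[i]
--         counter2 = tags_list[i+1]
--         if (counter1 in ksi) and (counter2 in ksi[tags_list[i]]):
--
--             ksi[counter1][counter2]+=1
--         elif (counter1 in ksi) and (counter2 not in ksi[counter1]):
--             ksi[counter1][counter2]=1
--         else:
--
--             temp = {}
--             temp[counter2]=1
--             ksi[counter1]=temp
--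
--         i += 1
--     return ksi
-- ===== SOURCE B (Python) =====
-- def get_ksi(tags_list, ksi):
--     # Phase 1: tabulate counts of all consecutive tag pairs in one pass.
--     pair_counts = {}
--     for p in zip(tags_list, tags_list[1:]):
--         pair_counts[p] = pair_counts.get(p, 0) + 1
--     # Phase 2: distribute the aggregated counts into the existing ksi (mutated in place).
--     for (c1, c2), cnt in pair_counts.items():
--         inner = ksi.setdefault(c1, {})
--         inner[c2] = inner.get(c2, 0) + cnt
--     return ksi
-- ===== Notes on version B (the rewrite author's own statement) =====
-- stated objective: alternative
-- what changed: A interleaves counting and nested-dict updates in one index-driven while loop; B first tabulates all consecutive pairs into an aggregate count dict in one pass over zip(tags, tags[1:]), then distributes each aggregated count into ksi in a second loop over the distinct pairs.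
import Mathlib
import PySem

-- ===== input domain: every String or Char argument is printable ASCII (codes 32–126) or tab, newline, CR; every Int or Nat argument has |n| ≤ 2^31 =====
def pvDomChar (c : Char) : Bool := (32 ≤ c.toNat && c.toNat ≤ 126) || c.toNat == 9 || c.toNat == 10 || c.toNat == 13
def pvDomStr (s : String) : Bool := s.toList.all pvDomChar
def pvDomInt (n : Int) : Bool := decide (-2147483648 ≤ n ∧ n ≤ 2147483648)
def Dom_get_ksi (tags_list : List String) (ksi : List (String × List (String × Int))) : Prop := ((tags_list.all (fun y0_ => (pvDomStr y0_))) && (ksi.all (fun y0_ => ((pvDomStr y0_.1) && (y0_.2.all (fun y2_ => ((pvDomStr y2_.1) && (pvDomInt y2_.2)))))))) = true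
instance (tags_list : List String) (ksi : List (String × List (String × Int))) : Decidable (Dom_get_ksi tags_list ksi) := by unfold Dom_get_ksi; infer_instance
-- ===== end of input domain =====

-- B re-implements A's single interleaved counting loop as tabulate-then-distribute (aggregate pair counts first,
-- then fold them into ksi); equal return value, same cost class ('alternative', not claimed faster).
-- Both Pythons mutate ksi in place and return it; the equivalence proved here is about the return value.

-- shared marshalling between the Python dict-of-dicts and the List-association-list convention
def pvToD (ksi : List (String × List (String × Int))) : PySem.Dict String (PySem.Dict String Int) :=
  PySem.Dict.ofList (ksi.map (fun p => (p.1, PySem.Dict.ofList p.2)))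
def pvFromD (d : PySem.Dict String (PySem.Dict String Int)) : List (String × List (String × Int)) :=
  d.items.map (fun p => (p.1, p.2.items))

-- ===== PORT A =====
-- while i < len(tags_list)-1 ported as a fold over range; the 'match' guard only makes the in-range
-- index accesses total (both indices are always in range when i < len-1; the '| _ => d' arm is unreachable).
def get_ksi (tags_list : List String) (ksi : List (String × List (String × Int))) : List (String × List (String × Int)) :=
  let d0 := pvToD ksi
  let counter_var := tags_list.length - 1
  let d := (List.range counter_var).foldl (fun d (i : Nat) =>
    match PySem.List.pyGet? tags_list (i : Int), PySem.List.pyGet? tags_list ((i : Int) + 1) with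
    | some counter1, some counter2 =>
      let inner := d.getD counter1 PySem.Dict.empty
      if d.contains counter1 && inner.contains counter2 then
        d.insert counter1 (inner.insert counter2 (inner.getD counter2 0 + 1))
      else if d.contains counter1 && !inner.contains counter2 then
        d.insert counter1 (inner.insert counter2 1)
      else
        d.insert counter1 (PySem.Dict.empty.insert counter2 1)
    | _, _ => d) d0
  pvFromD d

-- ===== PORT B =====
def get_ksi_alt (tags_list : List String) (ksi : List (String × List (String × Int))) : List (String × List (String × Int)) :=
  let d0 := pvToD ksi
  -- pair_counts = {}; for p in zip(tags_list, tags_list[1:]): pair_counts[p] = pair_counts.get(p, 0) + 1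
  let pairs := tags_list.zip (PySem.List.slice tags_list (some 1) none)
  let pc := pairs.foldl (fun pc p => pc.insert p (pc.getD p 0 + 1)) PySem.Dict.empty
  -- for (c1, c2), cnt in pair_counts.items(): inner = ksi.setdefault(c1, {}); inner[c2] = inner.get(c2, 0) + cnt
  let d := pc.items.foldl (fun d it =>
    let inner := d.getD it.1.1 PySem.Dict.empty
    d.insert it.1.1 (inner.insert it.1.2 (inner.getD it.1.2 0 + it.2))) d0
  pvFromD d

-- ===== PRECONDITION & SPEC =====
def Spec_get_ksi (tags_list : List String) (ksi : List (String × List (String × Int))) (out : List (String × List (String × Int))) : Prop := out = get_ksi_alt tags_list ksi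
instance (tags_list : List String) (ksi : List (String × List (String × Int))) (out : List (String × List (String × Int))) : Decidable (Spec_get_ksi tags_list ksi out) := by unfold Spec_get_ksi; infer_instance

-- ===== CLAIM (what is proved, stated in full; the proofs are below) =====
def Claim_equal_get_ksi : Prop := ∀ (tags_list : List String) (ksi : List (String × List (String × Int))), Dom_get_ksi tags_list ksi → Spec_get_ksi tags_list ksi (get_ksi tags_list ksi)

-- ===== LEMMAS AND PROOFS =====

-- the common single-pair update: bump the (p.1, p.2) cell by c
def pvAddk (d : PySem.Dict String (PySem.Dict String Int)) (p : String × String) (c : Int) :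
    PySem.Dict String (PySem.Dict String Int) :=
  let inner := d.getD p.1 PySem.Dict.empty
  d.insert p.1 (inner.insert p.2 (inner.getD p.2 0 + c))

-- the cell (p.1, p.2) exists in d
def pvP (p : String × String) (d : PySem.Dict String (PySem.Dict String Int)) : Prop :=
  d.contains p.1 = true ∧ (d.getD p.1 PySem.Dict.empty).contains p.2 = true

-- two inserts at distinct keys commute when the first key is already present
theorem pv_insert_comm_of_contains {κ ν : Type} [BEq κ] [LawfulBEq κ]
    (d : PySem.Dict κ ν) (k k' : κ) (v v' : ν)
    (hc : d.contains k = true) (hne : k' ≠ k) :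
    (d.insert k v).insert k' v' = (d.insert k' v').insert k v := by
  have hck' : (d.insert k v).contains k' = d.contains k' := by
    simp [PySem.Dict.contains_insert, hne]
  have hck : (d.insert k' v').contains k = true := by
    simp [PySem.Dict.contains_insert, hc]
  apply PySem.Dict.ext
  by_cases h2 : d.contains k' = true
  · rw [PySem.Dict.items_insert_of_contains _ v' (by rw [hck']; exact h2),
        PySem.Dict.items_insert_of_contains _ v hc,
        PySem.Dict.items_insert_of_contains _ v hck,
        PySem.Dict.items_insert_of_contains _ v' h2,
        List.map_map, List.map_map]
    apply List.map_congr_left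
    intro p _
    simp only [Function.comp_apply]
    by_cases e1 : p.1 = k <;> by_cases e2 : p.1 = k' <;>
      simp_all [beq_iff_eq, Ne.symm hne]
  · have h2' : d.contains k' = false := by simpa using h2
    rw [PySem.Dict.items_insert_of_not_contains _ v' (by rw [hck']; exact h2'),
        PySem.Dict.items_insert_of_contains _ v hc,
        PySem.Dict.items_insert_of_contains _ v hck,
        PySem.Dict.items_insert_of_not_contains _ v' h2',
        List.map_append]
    simp [beq_iff_eq, hne]

theorem pv_addk_succ (d : PySem.Dict String (PySem.Dict String Int)) (p : String × String) (c : Int) :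
    pvAddk d p (c + 1) = pvAddk (pvAddk d p c) p 1 := by
  simp [pvAddk, PySem.Dict.getD_insert_self, PySem.Dict.insert_insert_self, add_assoc]

theorem pv_P_addk_self (d : PySem.Dict String (PySem.Dict String Int)) (p : String × String) (c : Int) :
    pvP p (pvAddk d p c) := by
  constructor
  · simp [pvAddk, PySem.Dict.contains_insert_self]
  · simp [pvAddk, PySem.Dict.getD_insert_self, PySem.Dict.contains_insert_self]

theorem pv_P_addk (d : PySem.Dict String (PySem.Dict String Int)) (p q : String × String) (c : Int)
    (h : pvP p d) : pvP p (pvAddk d q c) := by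
  obtain ⟨h1, h2⟩ := h
  by_cases e1 : p.1 = q.1
  · constructor
    · simp [pvAddk, PySem.Dict.contains_insert, h1]
    · simp only [pvAddk, PySem.Dict.getD_insert, ← e1]
      by_cases e2 : p.2 = q.2
      · simp [← e2, PySem.Dict.contains_insert_self]
      · simp [PySem.Dict.contains_insert, h2]
  · constructor
    · simp [pvAddk, PySem.Dict.contains_insert, h1]
    · simpa [pvAddk, PySem.Dict.getD_insert, e1] using h2

theorem pv_addk_comm (d : PySem.Dict String (PySem.Dict String Int)) (p q : String × String) (c : Int)
    (h : pvP p d) (hne : q ≠ p) :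
    pvAddk (pvAddk d p 1) q c = pvAddk (pvAddk d q c) p 1 := by
  obtain ⟨p1, p2⟩ := p
  obtain ⟨q1, q2⟩ := q
  obtain ⟨h1, h2⟩ := h
  by_cases e1 : q1 = p1
  · subst e1
    have e2 : q2 ≠ p2 := fun e2 => hne (by rw [e2])
    simp only [pvAddk, PySem.Dict.getD_insert_self, PySem.Dict.insert_insert_self,
      PySem.Dict.getD_insert_of_ne _ _ _ e2, PySem.Dict.getD_insert_of_ne _ _ _ (Ne.symm e2)]
    rw [pv_insert_comm_of_contains _ p2 q2 _ _ h2 e2]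
  · simp only [pvAddk, PySem.Dict.getD_insert_of_ne _ _ _ e1,
      PySem.Dict.getD_insert_of_ne _ _ _ (Ne.symm e1)]
    rw [pv_insert_comm_of_contains _ p1 q1 _ _ h1 e1]

-- a bump of an existing cell commutes past a fold over pairs whose keys avoid it
theorem pv_pull (l : List ((String × String) × Int)) (t : PySem.Dict String (PySem.Dict String Int))
    (p : String × String) (h : pvP p t) (hl : ∀ q ∈ l, q.1 ≠ p) :
    l.foldl (fun d it => pvAddk d it.1 it.2) (pvAddk t p 1)
      = pvAddk (l.foldl (fun d it => pvAddk d it.1 it.2) t) p 1 := by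
  induction l generalizing t with
  | nil => rfl
  | cons q l ih =>
    simp only [List.foldl_cons]
    rw [pv_addk_comm t p q.1 q.2 h (hl q (by simp))]
    exact ih (pvAddk t q.1 q.2) (pv_P_addk t p q.1 q.2 h) (fun r hr => hl r (by simp [hr]))

theorem pv_step_main (l : List ((String × String) × Int))
    (t : PySem.Dict String (PySem.Dict String Int)) (p : String × String) (c : Int)
    (hl : ∀ q ∈ l, q.1 ≠ p) :
    l.foldl (fun d it => pvAddk d it.1 it.2) (pvAddk t p (c + 1))
      = pvAddk (l.foldl (fun d it => pvAddk d it.1 it.2) (pvAddk t p c)) p 1 := by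
  rw [pv_addk_succ]
  exact pv_pull l (pvAddk t p c) p (pv_P_addk_self t p c) hl

-- incremental bumping = distributing the aggregated counts over the distinct pairs
theorem pv_main (ps : List (String × String)) (d : PySem.Dict String (PySem.Dict String Int)) :
    ps.foldl (fun d p => pvAddk d p 1) d
      = ((PySem.Set.ofList ps).map (fun k => (k, (ps.count k : Int)))).foldl
          (fun d it => pvAddk d it.1 it.2) d := by
  induction ps using List.reverseRecOn with
  | nil => rfl
  | append_singleton ps p ih =>
    rw [List.foldl_append, List.foldl_cons, List.foldl_nil, ih,
      PySem.Set.ofList_append_singleton, PySem.Set.add_eq_ite]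
    by_cases hp : p ∈ PySem.Set.ofList ps
    · -- p already counted: its count goes up by one, in place
      obtain ⟨l1, l2, hdec⟩ := List.append_of_mem hp
      have hnd : (PySem.Set.ofList ps).Nodup := PySem.Set.nodup_ofList ps
      rw [hdec] at hnd
      have hp1 : p ∉ l1 := by
        intro hm; exact (List.disjoint_of_nodup_append hnd hm) (by simp)
      have hp2 : p ∉ l2 := by
        have := (List.nodup_append.mp hnd).2.1
        simpa using (List.nodup_cons.mp this).1
      rw [if_pos hp, hdec]
      have hmap : ∀ (cnt : String × String → Int),
          (l1 ++ p :: l2).map (fun k => (k, cnt k))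
            = l1.map (fun k => (k, cnt k)) ++ (p, cnt p) :: l2.map (fun k => (k, cnt k)) := by
        intro cnt; simp
      rw [hmap, hmap, List.foldl_append, List.foldl_append, List.foldl_cons, List.foldl_cons]
      have hcl : ∀ k, k ≠ p → ((ps ++ [p]).count k : Int) = (ps.count k : Int) := by
        intro k hk; simp [List.count_append, List.count_singleton, Ne.symm hk]
      have hcongr : ∀ (l : List (String × String)), p ∉ l →
          l.map (fun k => (k, ((ps ++ [p]).count k : Int))) = l.map (fun k => (k, (ps.count k : Int))) := by
        intro l hl'
        apply List.map_congr_left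
        intro k hk
        have : k ≠ p := fun e => hl' (e ▸ hk)
        rw [hcl k this]
      rw [hcongr l1 hp1, hcongr l2 hp2]
      have hcp : ((ps ++ [p]).count p : Int) = ((ps.count p : Int) + 1) := by
        simp [List.count_append]
      rw [hcp]
      refine (pv_step_main _ _ p _ ?_).symm
      intro q hq
      obtain ⟨k, hk, rfl⟩ := List.mem_map.mp hq
      intro e
      have ekp : k = p := e
      exact hp2 (ekp ▸ hk)
    · -- a new pair: appended at the end with count 1
      rw [if_neg hp]
      have hps : p ∉ ps := fun h => hp ((PySem.Set.mem_ofList _ _).2 h)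
      have hcongr : (PySem.Set.ofList ps).map (fun k => (k, ((ps ++ [p]).count k : Int)))
          = (PySem.Set.ofList ps).map (fun k => (k, (ps.count k : Int))) := by
        apply List.map_congr_left
        intro k hk
        have : k ≠ p := fun e => hp (e ▸ hk)
        simp [List.count_append, List.count_singleton, Ne.symm this]
      rw [List.map_append, hcongr, List.foldl_append]
      simp [List.count_append, List.count_eq_zero_of_not_mem hps]

-- A's three-way branch is exactly a bump by 1
theorem pv_body_eq (d : PySem.Dict String (PySem.Dict String Int)) (c1 c2 : String) :
    (let inner := d.getD c1 PySem.Dict.empty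
     if d.contains c1 && inner.contains c2 then
       d.insert c1 (inner.insert c2 (inner.getD c2 0 + 1))
     else if d.contains c1 && !inner.contains c2 then
       d.insert c1 (inner.insert c2 1)
     else
       d.insert c1 (PySem.Dict.empty.insert c2 1)) = pvAddk d (c1, c2) 1 := by
  simp only [pvAddk]
  by_cases h1 : d.contains c1 = true
  · by_cases h2 : (d.getD c1 PySem.Dict.empty).contains c2 = true
    · simp [h1, h2]
    · have h2' : (d.getD c1 PySem.Dict.empty).contains c2 = false := by simpa using h2
      simp [h1, h2', PySem.Dict.getD_of_not_contains _ _ h2']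
  · have h1' : d.contains c1 = false := by simpa using h1
    simp [h1', PySem.Dict.getD_of_not_contains _ _ h1', PySem.Dict.getD_empty]

theorem pv_zip_eq_map (tags : List String) :
    tags.zip tags.tail
      = (List.range (tags.length - 1)).map
          (fun (i : Nat) => ((PySem.List.pyGet? tags (i : Int)).getD "", (PySem.List.pyGet? tags ((i : Int) + 1)).getD "")) := by
  apply List.ext_getElem
  · simp [List.length_zip, List.length_tail]
  · intro i h1 h2
    have hlen : i < tags.length - 1 := by simpa using h2
    have hi : i < tags.length := by omega
    have hi1 : i + 1 < tags.length := by omega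
    have e1 : PySem.List.pyGet? tags (i : Int) = some tags[i] := by
      simp [PySem.List.pyGet?_natCast, List.getElem?_eq_getElem hi]
    have e2 : PySem.List.pyGet? tags ((i : Int) + 1) = some tags[i + 1] := by
      have h0 : (0 : Int) ≤ (i : Int) + 1 := by omega
      have ht : ((i : Int) + 1).toNat = i + 1 := by omega
      rw [PySem.List.pyGet?_of_nonneg tags h0, ht, List.getElem?_eq_getElem hi1]
    simp [List.getElem_zip, List.getElem_tail, e1, e2, List.getElem?_eq_getElem hi]

-- A's index loop is the bump fold over the consecutive pairs
theorem pv_A_loop (tags : List String) (d0 : PySem.Dict String (PySem.Dict String Int)) :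
    (List.range (tags.length - 1)).foldl (fun d (i : Nat) =>
      match PySem.List.pyGet? tags (i : Int), PySem.List.pyGet? tags ((i : Int) + 1) with
      | some counter1, some counter2 =>
        let inner := d.getD counter1 PySem.Dict.empty
        if d.contains counter1 && inner.contains counter2 then
          d.insert counter1 (inner.insert counter2 (inner.getD counter2 0 + 1))
        else if d.contains counter1 && !inner.contains counter2 then
          d.insert counter1 (inner.insert counter2 1)
        else
          d.insert counter1 (PySem.Dict.empty.insert counter2 1)
      | _, _ => d) d0
    = (tags.zip tags.tail).foldl (fun d p => pvAddk d p 1) d0 := by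
  rw [pv_zip_eq_map, List.foldl_map]
  apply PySem.List.foldl_congr_mem
  intro acc i hi
  have hlen : i < tags.length - 1 := List.mem_range.mp hi
  have hi0 : i < tags.length := by omega
  have hi1 : i + 1 < tags.length := by omega
  have e1 : PySem.List.pyGet? tags (i : Int) = some tags[i] := by
    simp [PySem.List.pyGet?_natCast, List.getElem?_eq_getElem hi0]
  have e2 : PySem.List.pyGet? tags ((i : Int) + 1) = some tags[i + 1] := by
    have h0 : (0 : Int) ≤ (i : Int) + 1 := by omega
    have ht : ((i : Int) + 1).toNat = i + 1 := by omega
    rw [PySem.List.pyGet?_of_nonneg tags h0, ht, List.getElem?_eq_getElem hi1]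
  rw [e1, e2]
  exact pv_body_eq acc tags[i] tags[i + 1]

-- ===== VERDICT (by name: the statement is the Claim_ definition above) =====
theorem get_ksi_spec : Claim_equal_get_ksi := by
  intro tags ksi _
  simp only [Spec_get_ksi, get_ksi, get_ksi_alt]
  rw [PySem.List.slice_from_one, PySem.Dict.foldl_insert_getD_add_one_eq_counter, pv_A_loop]
  congr 1
  rw [pv_main, PySem.Dict.items_counter]
  rfl
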